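-- pv_equiv track=rewrite | github.com/Artemyt056/second_lvl | hw8/hw_8.py | find_most_common_short_word
-- ===== SOURCE A (Python) =====
-- def find_most_common_short_word(text):
--     words = text.split()
--     word_counts = {}
--
--     for word in words:
--
--         clean_word = ''.join(char for char in word if char.isalnum())
--
--         if clean_word:
--             word_counts[clean_word] = word_counts.get(clean_word, 0) + 1
--
--     most_common_short_word = min(word_counts, key=lambda x: (len(x), -word_counts[x]))
--
--     return most_common_short_word
-- ===== SOURCE B (Python) =====
-- def find_most_common_short_word(text):
--     # Streaming: keep counts only for words of the shortest length seen so far;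
--     # a strictly shorter word discards the bucket.
--     min_len = None
--     bucket = {}
--     for word in text.split():
--         clean_word = ''.join(char for char in word if char.isalnum())
--         if not clean_word:
--             continue
--         length = len(clean_word)
--         if min_len is None or length < min_len:
--             min_len = length
--             bucket = {}
--         if length == min_len:
--             bucket[clean_word] = bucket.get(clean_word, 0) + 1
--     return max(bucket, key=bucket.get)
-- ===== Notes on version B (the rewrite author's own statement) =====
-- stated objective: alternative
-- what changed: A builds a counts dict over ALL cleaned words and then takes a single min with the tuple key (len, -count); B streams: it keeps a count bucket only for words of the shortest length seen so far, discarding the bucket whenever a strictly shorter word appears, and finally takes the highest-count word of that bucket.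
import Mathlib
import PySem

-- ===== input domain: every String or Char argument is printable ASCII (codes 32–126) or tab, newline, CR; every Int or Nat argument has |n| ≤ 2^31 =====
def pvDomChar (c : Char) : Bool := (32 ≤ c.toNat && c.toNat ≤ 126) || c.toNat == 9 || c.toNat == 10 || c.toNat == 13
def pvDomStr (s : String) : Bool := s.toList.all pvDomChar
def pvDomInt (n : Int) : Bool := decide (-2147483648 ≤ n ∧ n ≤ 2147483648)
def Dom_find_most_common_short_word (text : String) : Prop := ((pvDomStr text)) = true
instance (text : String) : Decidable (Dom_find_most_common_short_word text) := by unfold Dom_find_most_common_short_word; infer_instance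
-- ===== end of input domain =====

-- B replaces A's global counts dict + keyed min by a streaming algorithm: it counts ONLY
-- words of the shortest length seen so far, discarding the bucket whenever a strictly
-- shorter word appears, then takes the highest-count word of that bucket (objective:
-- alternative; same exception on texts with no alphanumeric word).

-- ===== PORT A =====
-- A's counting loop: a dict of counts over ALL cleaned words
def pvCounts (text : String) : PySem.Dict String Int :=
  (PySem.Str.split₀ text).foldl
    (fun word_counts word =>
      let clean_word := word.toList.filter PySem.Chars.isalnum
      if clean_word ≠ [] then
        word_counts.insert (String.ofList clean_word)
          (word_counts.getD (String.ofList clean_word) 0 + 1)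
      else word_counts)
    PySem.Dict.empty

def find_most_common_short_word (text : String) : String :=
  let word_counts := pvCounts text
  -- min(word_counts, key=lambda x: (len(x), -word_counts[x])); on an empty dict Python
  -- raises ValueError (excluded by Pre_), the port returns "".
  (PySem.List.min2? word_counts.keys
      (fun x => PySem.Str.len x)
      (fun x => -(word_counts.getD x 0))).getD ""

-- ===== PORT B =====
def find_most_common_short_word_alt (text : String) : String :=
  -- state = (min_len, bucket): counts of the words of the minimal length seen so far
  let st := (PySem.Str.split₀ text).foldl
    (fun (st : Option Int × PySem.Dict String Int) word =>
      let clean_word := word.toList.filter PySem.Chars.isalnum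
      if clean_word = [] then st
      else
        let w := String.ofList clean_word
        let length := PySem.Str.len w
        -- if min_len is None or length < min_len: min_len = length; bucket = {}
        let st1 : Option Int × PySem.Dict String Int :=
          match st.1 with
          | none => (some length, PySem.Dict.empty)
          | some ml => if length < ml then (some length, PySem.Dict.empty) else st
        -- if length == min_len: bucket[w] = bucket.get(w, 0) + 1
        if st1.1 = some length then
          (st1.1, st1.2.insert w (st1.2.getD w 0 + 1))
        else st1)
    ((none, PySem.Dict.empty) : Option Int × PySem.Dict String Int)
  -- max(bucket, key=bucket.get); on an empty bucket Python raises ValueError (excluded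
  -- by Pre_), the port returns "".
  (PySem.List.max? st.2.keys (fun x => st.2.getD x 0)).getD ""

-- ===== PRECONDITION & SPEC =====
-- Pre_ excludes exactly the texts with no alphanumeric character: A's counts dict is then
-- empty and Python's min({}) raises ValueError (B's max({}) raises the same ValueError).
def Pre_find_most_common_short_word (text : String) : Prop :=
  text.toList.any PySem.Chars.isalnum = true
instance (text : String) : Decidable (Pre_find_most_common_short_word text) := by
  unfold Pre_find_most_common_short_word; infer_instance

def pvWitness_find_most_common_short_word : String := "aa b aa cc b b"

def Spec_find_most_common_short_word (text : String) (out : String) : Prop :=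
  out = find_most_common_short_word_alt text
instance (text : String) (out : String) : Decidable (Spec_find_most_common_short_word text out) := by
  unfold Spec_find_most_common_short_word; infer_instance

-- ===== CLAIM (what is proved, stated in full; the proofs are below) =====
def Claim_equal_find_most_common_short_word : Prop :=
  ∀ (text : String), Dom_find_most_common_short_word text →
    Pre_find_most_common_short_word text →
    Spec_find_most_common_short_word text (find_most_common_short_word text)

-- ===== LEMMAS AND PROOFS =====

-- named copies of the two fold bodies (definitionally equal to the ports' lambdas)
def pvAstep (word_counts : PySem.Dict String Int) (word : String) : PySem.Dict String Int :=
  let clean_word := word.toList.filter PySem.Chars.isalnum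
  if clean_word ≠ [] then
    word_counts.insert (String.ofList clean_word)
      (word_counts.getD (String.ofList clean_word) 0 + 1)
  else word_counts

def pvBstep (st : Option Int × PySem.Dict String Int) (word : String) :
    Option Int × PySem.Dict String Int :=
  let clean_word := word.toList.filter PySem.Chars.isalnum
  if clean_word = [] then st
  else
    let w := String.ofList clean_word
    let length := PySem.Str.len w
    let st1 : Option Int × PySem.Dict String Int :=
      match st.1 with
      | none => (some length, PySem.Dict.empty)
      | some ml => if length < ml then (some length, PySem.Dict.empty) else st
    if st1.1 = some length then
      (st1.1, st1.2.insert w (st1.2.getD w 0 + 1))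
    else st1

lemma pvCounts_eq (text : String) :
    pvCounts text = (PySem.Str.split₀ text).foldl pvAstep PySem.Dict.empty := rfl

lemma pvAlt_eq (text : String) :
    find_most_common_short_word_alt text =
      (PySem.List.max?
        ((PySem.Str.split₀ text).foldl pvBstep (none, PySem.Dict.empty)).2.keys
        (fun x =>
          ((PySem.Str.split₀ text).foldl pvBstep (none, PySem.Dict.empty)).2.getD x 0)).getD "" := rfl

-- the running minimum length (B's `min_len` recurrence, over an arbitrary key list)
def pvLenStep (ml : Option Int) (w : String) : Option Int :=
  match ml with
  | none => some (PySem.Str.len w)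
  | some m => if PySem.Str.len w < m then some (PySem.Str.len w) else some m

def pvLenfold (ks : List String) : Option Int := ks.foldl pvLenStep none

def pvMrun (m : Int) (ks : List String) : Int :=
  ks.foldl (fun m w => if PySem.Str.len w < m then PySem.Str.len w else m) m

lemma pvMrun_nil (m : Int) : pvMrun m [] = m := rfl

lemma pvMrun_cons (m : Int) (k : String) (ks : List String) :
    pvMrun m (k :: ks) = pvMrun (if PySem.Str.len k < m then PySem.Str.len k else m) ks := rfl

lemma pvMrun_le (m : Int) (ks : List String) : pvMrun m ks ≤ m := by
  induction ks generalizing m with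
  | nil => simp [pvMrun_nil]
  | cons k ks ih =>
    rw [pvMrun_cons]
    refine le_trans (ih _) ?_
    split <;> omega

lemma pvMrun_mem_le (m : Int) (ks : List String) :
    ∀ y ∈ ks, pvMrun m ks ≤ PySem.Str.len y := by
  induction ks generalizing m with
  | nil => intro y hy; simp at hy
  | cons k ks ih =>
    intro y hy
    rw [pvMrun_cons]
    rcases List.mem_cons.mp hy with h | h
    · subst h
      refine le_trans (pvMrun_le _ _) ?_
      split <;> omega
    · exact ih _ y h

lemma pvLenfold_some (m : Int) (ks : List String) :
    ks.foldl pvLenStep (some m) = some (pvMrun m ks) := by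
  induction ks generalizing m with
  | nil => rfl
  | cons k ks ih =>
    rw [List.foldl_cons, pvMrun_cons]
    show ks.foldl pvLenStep (pvLenStep (some m) k) = _
    unfold pvLenStep
    simp only []
    split <;> exact ih _

lemma pvLenfold_cons (k : String) (ks : List String) :
    pvLenfold (k :: ks) = some (pvMrun (PySem.Str.len k) ks) := by
  unfold pvLenfold
  rw [List.foldl_cons]
  exact pvLenfold_some _ _

lemma pvLenfold_eq_none_iff (ks : List String) : pvLenfold ks = none ↔ ks = [] := by
  cases ks with
  | nil => simp [pvLenfold]
  | cons k ks => simp [pvLenfold_cons]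

lemma pvLenfold_le_mem (ks : List String) (M : Int) (h : pvLenfold ks = some M) :
    ∀ y ∈ ks, M ≤ PySem.Str.len y := by
  cases ks with
  | nil => intro y hy; simp at hy
  | cons k ks =>
    rw [pvLenfold_cons] at h
    injection h with h
    intro y hy
    rcases List.mem_cons.mp hy with h' | h'
    · subst h'; rw [← h]; exact pvMrun_le _ _
    · rw [← h]; exact pvMrun_mem_le _ _ y h'

lemma pvLenfold_append_singleton (ks : List String) (k : String) :
    pvLenfold (ks ++ [k]) = pvLenStep (pvLenfold ks) k := by
  unfold pvLenfold
  rw [List.foldl_append]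
  rfl

-- A's fold step (the body of PySem.List.min2? at A's keys)
def pvStepA (c : String → Int) : Option String → String → Option String :=
  fun acc x =>
    match acc with
    | none => some x
    | some m =>
      if (decide (PySem.Str.len x < PySem.Str.len m) ||
          !decide (PySem.Str.len m < PySem.Str.len x) && decide (-(c x) < -(c m))) = true
      then some x else some m

-- the gated max-count step (what the min2? phase does once the min length M is known)
def pvStepB (c : String → Int) (M : Int) : Option String → String → Option String :=
  fun best w =>
    if decide (PySem.Str.len w = M) &&
       (match best with
        | none => true
        | some bw => decide (c bw < c w))
    then some w else best

-- the body of PySem.List.max? (keeps the FIRST maximal element)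
def pvMaxStep (c : String → Int) : Option String → String → Option String :=
  fun acc x =>
    match acc with
    | none => some x
    | some m => if c m < c x then some x else some m

lemma pvMax?_eq_foldl (ks : List String) (c : String → Int) :
    PySem.List.max? ks c = ks.foldl (pvMaxStep c) none := by
  unfold PySem.List.max?
  congr 1
  funext acc x
  cases acc <;> rfl

-- the invariant tying A's running lexicographic minimum to the (min-length, max-count) view
lemma pv_inv (c : String → Int) (ks : List String) (b : String) :
    ks.foldl (pvStepB c (pvMrun (PySem.Str.len b) ks))
      (if PySem.Str.len b = pvMrun (PySem.Str.len b) ks then some b else none)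
  = ks.foldl (pvStepA c) (some b) := by
  induction ks generalizing b with
  | nil => simp [pvMrun_nil]
  | cons k ks ih =>
    have hstep : ∃ b', pvStepA c (some b) k = some b' ∧
        PySem.Str.len b' = (if PySem.Str.len k < PySem.Str.len b then PySem.Str.len k
                            else PySem.Str.len b) ∧ (b' = k ∨ b' = b) ∧
        (PySem.Str.len k = PySem.Str.len b → (b' = (if c b < c k then k else b))) := by
      simp only [pvStepA]
      split
      · rename_i h
        simp only [Bool.or_eq_true, Bool.and_eq_true, decide_eq_true_eq, Bool.not_eq_true',
          decide_eq_false_iff_not] at h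
        refine ⟨k, rfl, ?_, Or.inl rfl, ?_⟩
        · rcases h with h | ⟨h, _⟩ <;> split <;> omega
        · intro he
          rcases h with h | ⟨_, h⟩
          · omega
          · rw [if_pos (by omega)]
      · rename_i h
        simp only [Bool.or_eq_true, Bool.and_eq_true, decide_eq_true_eq, Bool.not_eq_true',
          decide_eq_false_iff_not, not_or, not_and] at h
        refine ⟨b, rfl, ?_, Or.inr rfl, ?_⟩
        · rw [if_neg (by omega)]
        · intro he
          rw [if_neg (by omega)]
    obtain ⟨b', hb', hlen, hmem, heq⟩ := hstep
    have hmin : (if PySem.Str.len k < PySem.Str.len b then PySem.Str.len k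
                 else PySem.Str.len b) = PySem.Str.len b' := hlen.symm
    set M := pvMrun (PySem.Str.len b) (k :: ks) with hM
    have hM' : M = pvMrun (PySem.Str.len b') ks := by
      rw [hM, pvMrun_cons, hmin]
    have hMle : M ≤ PySem.Str.len b' := hM' ▸ pvMrun_le _ _
    have hMleb : M ≤ PySem.Str.len b := by rw [← hmin] at hMle; split at hMle <;> omega
    have hMlek : M ≤ PySem.Str.len k := by rw [← hmin] at hMle; split at hMle <;> omega
    have hfirst : pvStepB c M (if PySem.Str.len b = M then some b else none) k
        = (if PySem.Str.len b' = M then some b' else none) := by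
      by_cases hk : PySem.Str.len k = M
      · by_cases hb : PySem.Str.len b = M
        · have hkb : PySem.Str.len k = PySem.Str.len b := by omega
          by_cases hc : c b < c k
          · have h1 : b' = k := by rw [heq hkb, if_pos hc]
            rw [if_pos hb, h1, if_pos hk]
            simp only [pvStepB, hk, decide_true, hc, Bool.true_and, if_pos]
          · have h1 : b' = b := by rw [heq hkb, if_neg hc]
            rw [if_pos hb, h1, if_pos hb]
            simp only [pvStepB, hc, decide_false, Bool.and_false, if_neg, Bool.false_eq_true,
              not_false_eq_true]
        · have h1 : b' = k := by
            rcases hmem with h | h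
            · exact h
            · exfalso; rw [h] at hlen; split at hlen <;> omega
          rw [if_neg hb, h1, if_pos hk]
          simp only [pvStepB, hk, decide_true, Bool.true_and, if_pos]
      · by_cases hb : PySem.Str.len b = M
        · have h1 : b' = b := by
            rcases hmem with h | h
            · exfalso; rw [h] at hlen; split at hlen <;> omega
            · exact h
          rw [if_pos hb, h1, if_pos hb]
          simp only [pvStepB, hk, decide_false, Bool.false_and, if_neg,
            Bool.false_eq_true, not_false_eq_true]
        · have h1 : PySem.Str.len b' ≠ M := by rw [← hmin]; split <;> omega
          rw [if_neg hb, if_neg h1]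
          simp only [pvStepB, hk, decide_false, Bool.false_and, if_neg,
            Bool.false_eq_true, not_false_eq_true]
    rw [List.foldl_cons, List.foldl_cons, hb', hfirst, hM']
    exact ih b'

-- A's keyed min equals: find the min length M, then the gated max-count scan at M
lemma pv_select_eq (c : String → Int) (ks : List String) :
    (PySem.List.min2? ks (fun x => PySem.Str.len x) (fun x => -(c x))).getD ""
  = (match pvLenfold ks with
     | none => ""
     | some M =>
       match ks.foldl (pvStepB c M) none with
       | none => ""
       | some r => r) := by
  cases ks with
  | nil => rfl
  | cons k ks =>
    have hA : PySem.List.min2? (k :: ks) (fun x => PySem.Str.len x) (fun x => -(c x))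
        = ks.foldl (pvStepA c) (some k) := by
      have h : PySem.List.min2? (k :: ks) (fun x => PySem.Str.len x) (fun x => -(c x))
          = List.foldl (pvStepA c) none (k :: ks) := by
        unfold PySem.List.min2?
        congr 1
        funext acc x
        cases acc <;> rfl
      rw [h, List.foldl_cons]
      have h2 : pvStepA c none k = some k := by rfl
      rw [h2]
    rw [hA, pvLenfold_cons]
    show (ks.foldl (pvStepA c) (some k)).getD ""
      = (match (k :: ks).foldl (pvStepB c (pvMrun (PySem.Str.len k) ks)) none with
         | none => ""
         | some r => r)
    have hB1 : pvStepB c (pvMrun (PySem.Str.len k) ks) none k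
        = (if PySem.Str.len k = pvMrun (PySem.Str.len k) ks then some k else none) := by
      simp only [pvStepB, Bool.and_true]
      split <;> rename_i h
      · rw [if_pos (by simpa using h)]
      · rw [if_neg (by simpa using h)]
    rw [List.foldl_cons, hB1, pv_inv c ks k]
    cases ks.foldl (pvStepA c) (some k) <;> rfl

-- the gated scan over all keys is the plain max-count scan over the length-M keys
lemma pv_filterB (c : String → Int) (M : Int) (ks : List String) (acc : Option String) :
    ks.foldl (pvStepB c M) acc
  = (ks.filter (fun w => decide (PySem.Str.len w = M))).foldl (pvMaxStep c) acc := by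
  induction ks generalizing acc with
  | nil => rfl
  | cons k ks ih =>
    rw [List.foldl_cons, List.filter_cons]
    by_cases hk : PySem.Str.len k = M
    · rw [if_pos (by simpa using hk), List.foldl_cons, ← ih]
      congr 1
      simp only [pvStepB, pvMaxStep, hk, decide_true, Bool.true_and]
      cases acc with
      | none => rfl
      | some m =>
        simp only []
        split <;> rename_i h
        · rw [if_pos (by simpa using h)]
        · rw [if_neg (by simpa using h)]
    · rw [if_neg (by simpa using hk), ← ih]
      congr 1
      simp only [pvStepB, hk, decide_false, Bool.false_and, if_neg, Bool.false_eq_true,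
        not_false_eq_true]

-- the max-count scan only reads the counts of list members (and of the running best)
lemma pv_max_congr (c c' : String → Int) : ∀ (ks : List String) (acc : Option String),
    (∀ x ∈ ks, c x = c' x) → (∀ m, acc = some m → c m = c' m) →
    ks.foldl (pvMaxStep c) acc = ks.foldl (pvMaxStep c') acc := by
  intro ks
  induction ks with
  | nil => intros; rfl
  | cons k ks ih =>
    intro acc hks hacc
    rw [List.foldl_cons, List.foldl_cons]
    have hk : c k = c' k := hks k (List.mem_cons_self ..)
    have hstep : pvMaxStep c acc k = pvMaxStep c' acc k := by
      cases acc with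
      | none => rfl
      | some m =>
        simp only [pvMaxStep, hk, hacc m rfl]
    rw [hstep]
    refine ih (pvMaxStep c' acc k) (fun x hx => hks x (List.mem_cons_of_mem _ hx)) ?_
    intro m hm
    cases acc with
    | none =>
      simp only [pvMaxStep] at hm
      injection hm with hm
      subst hm; exact hk
    | some m0 =>
      simp only [pvMaxStep] at hm
      split at hm <;> injection hm with hm <;> subst hm
      · exact hk
      · exact hacc m0 rfl

-- a contained key, paired with its stored value, is one of the items
lemma pv_getD_mem_items (d : PySem.Dict String Int) (k : String) (h : d.contains k = true) :
    (k, d.getD k 0) ∈ d.items := by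
  rw [PySem.Dict.contains_eq_isSome_get?] at h
  cases hg : d.get? k with
  | none => rw [hg] at h; simp at h
  | some v =>
    have hm := PySem.Dict.mem_items_of_get?_eq_some d hg
    rw [PySem.Dict.getD_eq_get?_getD, hg]
    exact hm

-- the bucket's key list is the length-M filter of d's key list
lemma pv_bkeys (d b : PySem.Dict String Int) (M : Int)
    (h : b.items = d.items.filter (fun p => decide (PySem.Str.len p.1 = M))) :
    b.keys = d.keys.filter (fun w => decide (PySem.Str.len w = M)) := by
  simp only [PySem.Dict.keys, h]
  rw [List.filter_map]
  exact congrArg _ (List.filter_congr (fun x _ => rfl))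

-- in-place value update at key k commutes with the length filter
lemma pv_filter_map_update (l : List (String × Int)) (k : String) (v : Int) (M : Int) :
    (l.map (fun p => if p.1 == k then (k, v) else p)).filter
        (fun p => decide (PySem.Str.len p.1 = M))
      = (l.filter (fun p => decide (PySem.Str.len p.1 = M))).map
          (fun p => if p.1 == k then (k, v) else p) := by
  rw [List.filter_map]
  refine congrArg _ (List.filter_congr ?_)
  intro p _
  by_cases h : p.1 = k
  · simp [Function.comp, h]
  · simp [Function.comp, h]

-- one word step preserves the simulation invariant between A's dict and B's (min_len, bucket)
lemma pv_step (d b : PySem.Dict String Int) (ml : Option Int) (w : String)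
    (hnd : d.keys.Nodup)
    (hml : ml = pvLenfold d.keys)
    (hb : ∀ M, ml = some M →
      b.items = d.items.filter (fun p => decide (PySem.Str.len p.1 = M)))
    (hb0 : ml = none → b = PySem.Dict.empty) :
    (pvAstep d w).keys.Nodup ∧
    (pvBstep (ml, b) w).1 = pvLenfold (pvAstep d w).keys ∧
    (∀ M, (pvBstep (ml, b) w).1 = some M →
      (pvBstep (ml, b) w).2.items
        = (pvAstep d w).items.filter (fun p => decide (PySem.Str.len p.1 = M))) ∧
    ((pvBstep (ml, b) w).1 = none → (pvBstep (ml, b) w).2 = PySem.Dict.empty) := by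
  by_cases hcs : w.toList.filter PySem.Chars.isalnum = []
  · have hA : pvAstep d w = d := by simp only [pvAstep]; rw [if_neg (by simp [hcs])]
    have hB : pvBstep (ml, b) w = (ml, b) := by simp only [pvBstep]; rw [if_pos hcs]
    rw [hA, hB]
    exact ⟨hnd, hml, hb, hb0⟩
  · have hA : pvAstep d w
        = d.insert (String.ofList (w.toList.filter PySem.Chars.isalnum))
            (d.getD (String.ofList (w.toList.filter PySem.Chars.isalnum)) 0 + 1) := by
      simp only [pvAstep]
      rw [if_pos hcs]
    set k := String.ofList (w.toList.filter PySem.Chars.isalnum) with hk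
    set L := PySem.Str.len k with hLdef
    have hkL : ((k.length : Int)) = L := by simp [hLdef, PySem.Str.len]
    have hcsL : (((w.toList.filter PySem.Chars.isalnum).length : Int)) = L := by
      simp [hLdef, hk, PySem.Str.len]
    cases ml with
    | none =>
      have hkeys0 : d.keys = [] := (pvLenfold_eq_none_iff _).mp hml.symm
      have hitems0 : d.items = [] := by
        have h := hkeys0
        simp only [PySem.Dict.keys, List.map_eq_nil_iff] at h
        exact h
      have hcont : d.contains k = false := by
        rw [PySem.Dict.contains_eq_decide_mem_keys, hkeys0]; simp
      have hB : pvBstep (none, b) w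
          = (some L, (PySem.Dict.empty : PySem.Dict String Int).insert k
              ((PySem.Dict.empty : PySem.Dict String Int).getD k 0 + 1)) := by
        simp only [pvBstep]
        rw [if_neg hcs]
        simp [← hk]
        rw [hkL]
      rw [hA, hB]
      refine ⟨?_, ?_, ?_, by intro h; cases h⟩
      · rw [PySem.Dict.keys_insert_of_not_contains d _ hcont, hkeys0]
        simp
      · rw [PySem.Dict.keys_insert_of_not_contains d _ hcont, hkeys0]
        simp [pvLenfold_cons, pvMrun_nil]
        rw [hkL]
      · intro M' hM'
        injection hM' with hM'
        rw [PySem.Dict.items_insert_of_not_contains _ _ (by simp),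
            PySem.Dict.items_insert_of_not_contains _ _ hcont, hitems0,
            PySem.Dict.getD_of_not_contains _ _ hcont,
            show (PySem.Dict.empty : PySem.Dict String Int).items = [] from rfl]
        simp [← hM', hkL]
    | some M =>
      have hall : ∀ y ∈ d.keys, M ≤ PySem.Str.len y := pvLenfold_le_mem _ _ hml.symm
      have hb' := hb M rfl
      have hbkeys := pv_bkeys d b M hb'
      rcases lt_trichotomy L M with hlt | heq | hgt
      · -- a strictly shorter word: B resets the bucket; k is fresh in d
        have hknotmem : k ∉ d.keys := fun h => absurd (hall k h) (by omega)
        have hcont : d.contains k = false := by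
          rw [PySem.Dict.contains_eq_decide_mem_keys]; simp [hknotmem]
        have hB : pvBstep (some M, b) w
            = (some L, (PySem.Dict.empty : PySem.Dict String Int).insert k
                ((PySem.Dict.empty : PySem.Dict String Int).getD k 0 + 1)) := by
          simp only [pvBstep]
          rw [if_neg hcs]
          simp [← hk]
          rw [hkL, if_pos hlt, if_pos rfl]
          simp
        rw [hA, hB]
        refine ⟨?_, ?_, ?_, by intro h; cases h⟩
        · rw [PySem.Dict.keys_insert_of_not_contains d _ hcont]
          simp [List.nodup_append, hnd]
          intro a ha h
          exact hknotmem (h ▸ ha)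
        · rw [PySem.Dict.keys_insert_of_not_contains d _ hcont,
              pvLenfold_append_singleton, ← hml]
          simp [pvLenStep]
          rw [hkL, if_pos hlt]
        · intro M' hM'
          injection hM' with hM'
          rw [PySem.Dict.items_insert_of_not_contains _ _ (by simp),
              PySem.Dict.items_insert_of_not_contains _ _ hcont,
              List.filter_append]
          have hnil : d.items.filter (fun p => decide (PySem.Str.len p.1 = M')) = [] := by
            rw [List.filter_eq_nil_iff]
            intro p hp
            have := hall p.1 (PySem.Dict.mem_keys_of_mem_items d hp)
            simp only [decide_eq_true_eq]
            omega
          rw [hnil, PySem.Dict.getD_of_not_contains _ _ hcont,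
              show (PySem.Dict.empty : PySem.Dict String Int).items = [] from rfl]
          simp [← hM', hkL]
      · -- a word of the current minimal length: both sides count it
        have hcontb : b.contains k = d.contains k := by
          rw [PySem.Dict.contains_eq_decide_mem_keys,
              PySem.Dict.contains_eq_decide_mem_keys, hbkeys]
          simp [List.mem_filter]
          exact fun _ => hkL.trans heq
        have hndb : b.keys.Nodup := by rw [hbkeys]; exact hnd.filter _
        have hgd : b.getD k 0 = d.getD k 0 := by
          cases hc : d.contains k with
          | false =>
            rw [PySem.Dict.getD_of_not_contains _ _ (hcontb.trans hc),
                PySem.Dict.getD_of_not_contains _ _ hc]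
          | true =>
            have hmem := pv_getD_mem_items d k hc
            have hmemb : (k, d.getD k 0) ∈ b.items := by
              rw [hb', List.mem_filter]
              refine ⟨hmem, ?_⟩
              simp [hkL, heq]
            exact PySem.Dict.getD_of_mem_items b hmemb hndb 0
        have hB : pvBstep (some M, b) w = (some M, b.insert k (b.getD k 0 + 1)) := by
          simp only [pvBstep]
          rw [if_neg hcs]
          simp [← hk]
          rw [hkL, if_neg (by omega : ¬ L < M),
              if_pos (show (some M, b).1 = some L by rw [heq])]
        rw [hA, hB]
        cases hc : d.contains k with
        | true =>
          refine ⟨?_, ?_, ?_, by intro h; cases h⟩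
          · rw [PySem.Dict.keys_insert_of_contains d _ hc]
            exact hnd
          · rw [PySem.Dict.keys_insert_of_contains d _ hc]
            exact hml
          · intro M' hM'
            injection hM' with hM'
            subst hM'
            rw [PySem.Dict.items_insert_of_contains _ _ hc,
                PySem.Dict.items_insert_of_contains _ _ (hcontb.trans hc),
                pv_filter_map_update, ← hb', hgd]
        | false =>
          have hknotmem : k ∉ d.keys := by
            intro h
            rw [PySem.Dict.contains_eq_decide_mem_keys] at hc
            simp [h] at hc
          refine ⟨?_, ?_, ?_, by intro h; cases h⟩
          · rw [PySem.Dict.keys_insert_of_not_contains d _ hc]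
            simp [List.nodup_append, hnd]
            intro a ha h
            exact hknotmem (h ▸ ha)
          · rw [PySem.Dict.keys_insert_of_not_contains d _ hc,
              pvLenfold_append_singleton, ← hml]
            simp [pvLenStep]
            rw [hkL]
            omega
          · intro M' hM'
            injection hM' with hM'
            subst hM'
            rw [PySem.Dict.items_insert_of_not_contains _ _ hc,
                PySem.Dict.items_insert_of_not_contains _ _ (hcontb.trans hc),
                List.filter_append, ← hb',
                PySem.Dict.getD_of_not_contains _ _ hc,
                PySem.Dict.getD_of_not_contains _ _ (hcontb.trans hc)]
            simp [hkL, heq]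
      · -- a longer word: A counts it, B ignores it; the filter does not see it
        have hne : ¬ (M = L) := by omega
        have hB : pvBstep (some M, b) w = (some M, b) := by
          simp only [pvBstep]
          rw [if_neg hcs]
          simp [hcsL]
          rw [if_neg (by omega : ¬ L < M),
              if_neg (show ¬ ((some M, b).1 = some L) from
                fun h => hne (Option.some.inj h))]
        rw [hA, hB]
        cases hc : d.contains k with
        | true =>
          refine ⟨?_, ?_, ?_, by intro h; cases h⟩
          · rw [PySem.Dict.keys_insert_of_contains d _ hc]
            exact hnd
          · rw [PySem.Dict.keys_insert_of_contains d _ hc]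
            exact hml
          · intro M' hM'
            injection hM' with hM'
            subst hM'
            rw [PySem.Dict.items_insert_of_contains _ _ hc,
                pv_filter_map_update, ← hb']
            have hfix : ∀ p ∈ b.items, (if p.1 == k then (k, d.getD k 0 + 1) else p) = p := by
              intro p hp
              have hpl : PySem.Str.len p.1 = M := by
                rw [hb', List.mem_filter] at hp
                simpa using hp.2
              rw [if_neg ?_]
              simp only [beq_iff_eq]
              intro h
              rw [h] at hpl
              omega
            rw [List.map_congr_left hfix, List.map_id']
        | false =>
          have hknotmem : k ∉ d.keys := by
            intro h
            rw [PySem.Dict.contains_eq_decide_mem_keys] at hc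
            simp [h] at hc
          refine ⟨?_, ?_, ?_, by intro h; cases h⟩
          · rw [PySem.Dict.keys_insert_of_not_contains d _ hc]
            simp [List.nodup_append, hnd]
            intro a ha h
            exact hknotmem (h ▸ ha)
          · rw [PySem.Dict.keys_insert_of_not_contains d _ hc,
                pvLenfold_append_singleton, ← hml]
            simp [pvLenStep]
            rw [hkL]
            omega
          · intro M' hM'
            injection hM' with hM'
            subst hM'
            rw [PySem.Dict.items_insert_of_not_contains _ _ hc,
                List.filter_append, ← hb']
            simp [hkL]
            omega

-- the simulation invariant over the whole word list
lemma pv_main (ws : List String) (d b : PySem.Dict String Int) (ml : Option Int)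
    (hnd : d.keys.Nodup)
    (hml : ml = pvLenfold d.keys)
    (hb : ∀ M, ml = some M →
      b.items = d.items.filter (fun p => decide (PySem.Str.len p.1 = M)))
    (hb0 : ml = none → b = PySem.Dict.empty) :
    (ws.foldl pvAstep d).keys.Nodup ∧
    (ws.foldl pvBstep (ml, b)).1 = pvLenfold (ws.foldl pvAstep d).keys ∧
    (∀ M, (ws.foldl pvBstep (ml, b)).1 = some M →
      (ws.foldl pvBstep (ml, b)).2.items
        = (ws.foldl pvAstep d).items.filter (fun p => decide (PySem.Str.len p.1 = M))) ∧
    ((ws.foldl pvBstep (ml, b)).1 = none →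
      (ws.foldl pvBstep (ml, b)).2 = PySem.Dict.empty) := by
  induction ws generalizing d b ml with
  | nil => exact ⟨hnd, hml, hb, hb0⟩
  | cons w ws ih =>
    obtain ⟨h1, h2, h3, h4⟩ := pv_step d b ml w hnd hml hb hb0
    rw [List.foldl_cons, List.foldl_cons]
    have : pvBstep (ml, b) w = ((pvBstep (ml, b) w).1, (pvBstep (ml, b) w).2) := rfl
    rw [this]
    exact ih (pvAstep d w) (pvBstep (ml, b) w).2 (pvBstep (ml, b) w).1 h1 h2 h3 h4

-- ===== VERDICT (by name: the statement is the Claim_ definition above) =====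
theorem find_most_common_short_word_spec : Claim_equal_find_most_common_short_word := by
  intro text _ _
  unfold Spec_find_most_common_short_word
  show (PySem.List.min2? (pvCounts text).keys (fun x => PySem.Str.len x)
          (fun x => -((pvCounts text).getD x 0))).getD ""
     = find_most_common_short_word_alt text
  rw [pv_select_eq (fun x => (pvCounts text).getD x 0) (pvCounts text).keys, pvAlt_eq]
  obtain ⟨hnd, hml, hbit, hb0⟩ := pv_main (PySem.Str.split₀ text)
    PySem.Dict.empty PySem.Dict.empty none
    (by simp [PySem.Dict.keys_empty]) rfl (by intro M h; cases h) (fun _ => rfl)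
  rw [← pvCounts_eq] at hnd hml hbit
  set st := (PySem.Str.split₀ text).foldl pvBstep (none, PySem.Dict.empty) with hst
  cases hml' : st.1 with
  | none =>
    rw [hml'] at hml hb0
    have hred : (match pvLenfold (pvCounts text).keys with
       | none => ""
       | some M =>
         match (pvCounts text).keys.foldl
             (pvStepB (fun x => (pvCounts text).getD x 0) M) none with
         | none => ""
         | some r => r) = "" := by rw [← hml]
    rw [hred, hb0 rfl]
    simp [PySem.Dict.keys_empty, PySem.List.max?]
  | some M =>
    rw [hml'] at hml hbit
    have hred : (match pvLenfold (pvCounts text).keys with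
       | none => ""
       | some M =>
         match (pvCounts text).keys.foldl
             (pvStepB (fun x => (pvCounts text).getD x 0) M) none with
         | none => ""
         | some r => r)
      = (match (pvCounts text).keys.foldl
             (pvStepB (fun x => (pvCounts text).getD x 0) M) none with
         | none => ""
         | some r => r) := by rw [← hml]
    rw [hred]
    have hitems := hbit M rfl
    have hkeys : st.2.keys = (pvCounts text).keys.filter
        (fun w => decide (PySem.Str.len w = M)) := by
      simp only [PySem.Dict.keys, hitems]
      rw [List.filter_map]
      exact congrArg _ (List.filter_congr (fun x _ => rfl))
    have hndb : st.2.keys.Nodup := by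
      rw [hkeys]; exact hnd.filter _
    have hgetD : ∀ x ∈ st.2.keys, (pvCounts text).getD x 0 = st.2.getD x 0 := by
      intro x hx
      have hxd : x ∈ (pvCounts text).keys := by
        rw [hkeys] at hx; exact (List.mem_filter.mp hx).1
      have hc : (pvCounts text).contains x = true :=
        (PySem.Dict.contains_iff_mem_keys _ _).mpr hxd
      have hg : (pvCounts text).get? x = some ((pvCounts text).getD x 0) := by
        rw [PySem.Dict.contains_eq_isSome_get?] at hc
        cases hgx : (pvCounts text).get? x with
        | none => rw [hgx] at hc; simp at hc
        | some v => rw [PySem.Dict.getD_eq_get?_getD, hgx]; rfl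
      have hmem : (x, (pvCounts text).getD x 0) ∈ (pvCounts text).items :=
        PySem.Dict.mem_items_of_get?_eq_some _ hg
      have hP : (x, (pvCounts text).getD x 0) ∈ st.2.items := by
        rw [hitems, List.mem_filter]
        refine ⟨hmem, ?_⟩
        rw [hkeys] at hx
        exact (List.mem_filter.mp hx).2
      exact (PySem.Dict.getD_of_mem_items _ hP hndb 0).symm
    rw [pv_filterB, ← hkeys,
        pv_max_congr (fun x => (pvCounts text).getD x 0) (fun x => st.2.getD x 0)
          st.2.keys none hgetD (fun m hm => by cases hm),
        ← pvMax?_eq_foldl]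
    cases PySem.List.max? st.2.keys (fun x => st.2.getD x 0) <;> rfl
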